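-- pv_equiv track=rewrite | github.com/mkuizon/DSA | bonus/q4.py | find_longest_reducible
-- ===== SOURCE A (Python) =====
-- def generate_children(word):
--     return {word[:i] + word[i+1:] for i in range(len(word))}
--
-- def is_reducible(word, words, memo):
--     if word in memo:  # Already computed
--         return memo[word]
--     if word in {"I", "A"}:  # Base case: Single-letter words
--         return True
--
--     # Check if any child word is reducible
--     memo[word] = any(is_reducible(child, words, memo) for child in generate_children(word) if child in words)
--     return memo[word]
--
-- def find_longest_reducible(choices, words):
--     memo = {}  # Memoization dictionary
--     longest_word = ""
--     max_length = 0
--     word_reduction_counts = {}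
--
--     for word in choices:
--         if is_reducible(word, words, memo):
--             reduction_count = count_reductions(word, words, memo)
--             word_reduction_counts[word] = reduction_count
--             if len(word) > max_length:
--                 max_length = len(word)
--                 longest_word = word
--
--     return longest_word, word_reduction_counts
--
-- def count_reductions(word, words, memo):
--     if word in {"I", "A"}:
--         return 1  # Base case
--
--     children = [child for child in generate_children(word) if child in words and is_reducible(child, words, memo)]
--     return 1 + max((count_reductions(child, words, memo) for child in children), default=0)
-- ===== SOURCE B (Python) =====
-- def _best(depth, w):
--     # highest depth[c] + 1 over one-deletion children c present in `depth` (0 if none)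
--     best = 0
--     for i in range(len(w)):
--         c = w[:i] + w[i+1:]
--         if c in depth:
--             best = max(best, depth[c] + 1)
--     return best
--
-- def _build_depth(words):
--     # bottom-up DP: reduction depth for every reducible word of `words`,
--     # computed in order of increasing length so children are already done
--     depth = {}
--     for w in sorted(set(words), key=len):
--         if w in ("I", "A"):
--             depth[w] = 1
--         else:
--             best = _best(depth, w)
--             if best != 0:
--                 depth[w] = best
--     return depth
--
-- def find_longest_reducible(choices, words):
--     depth = _build_depth(words)
--     longest_word = ""
--     word_reduction_counts = {}
--     for word in choices:
--         if word in ("I", "A"):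
--             cnt = 1
--         else:
--             cnt = _best(depth, word)
--         if cnt != 0:
--             word_reduction_counts[word] = cnt
--             if len(word) > len(longest_word):
--                 longest_word = word
--     return longest_word, word_reduction_counts
-- ===== Notes on version B (the rewrite author's own statement) =====
-- stated objective: alternative
-- what changed: Replaces A's top-down recursion (memoized reachability plus an unmemoized count_reductions that re-walks the child tree) with a bottom-up DP: one table of reduction depths over the distinct words sorted by length, then a single child scan per choice word.
import Mathlib
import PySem

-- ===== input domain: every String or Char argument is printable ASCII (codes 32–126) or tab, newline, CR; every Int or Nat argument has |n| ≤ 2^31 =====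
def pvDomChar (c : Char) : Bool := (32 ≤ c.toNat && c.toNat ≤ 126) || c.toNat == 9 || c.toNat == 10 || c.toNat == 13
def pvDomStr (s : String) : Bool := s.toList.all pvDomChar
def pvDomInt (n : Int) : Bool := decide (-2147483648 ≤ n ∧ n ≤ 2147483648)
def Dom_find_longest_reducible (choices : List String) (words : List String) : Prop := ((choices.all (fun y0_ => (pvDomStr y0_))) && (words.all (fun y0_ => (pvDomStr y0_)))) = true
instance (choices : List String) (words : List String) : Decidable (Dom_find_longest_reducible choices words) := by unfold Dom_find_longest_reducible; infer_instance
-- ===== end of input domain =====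

-- B replaces A's top-down recursive count_reductions with a bottom-up DP over the words
-- sorted by length, computing each word's reduction depth once (objective: alternative).

-- word[:i] + word[i+1:]  (string slicing and concatenation, exact on code points; shared by both ports)
def pyDel (w : String) (i : Int) : String :=
  String.ofList (PySem.List.slice w.toList none (some i) ++ PySem.List.slice w.toList (some (i + 1)) none)

-- the children generated by `for i in range(len(word))`, in order
def childGen (w : String) : List String :=
  (PySem.List.pyRange 0 (PySem.Str.len w) 1).map (pyDel w)

-- ===== PORT A =====
def generate_children (word : String) : PySem.Set String :=
  PySem.Set.ofList (childGen word)

-- `any(... for child in ... if child in words)`: short-circuit scan threading the memo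
def anyRedLoop (fn : String → PySem.Dict String Bool → Bool × PySem.Dict String Bool)
    (words : List String) : List String → PySem.Dict String Bool → Bool × PySem.Dict String Bool
  | [], m => (false, m)
  | c :: rest, m =>
    if words.contains c then
      let r := fn c m
      if r.1 then (true, r.2) else anyRedLoop fn words rest r.2
    else anyRedLoop fn words rest m

def is_reducible (fuel : Nat) (word : String) (words : List String)
    (memo : PySem.Dict String Bool) : Bool × PySem.Dict String Bool :=
  match fuel with
  | 0 => (false, memo)          -- fuel guard only; fuel = len(word)+1 always suffices
  | f + 1 =>
    match memo.get? word with
    | some b => (b, memo)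
    | none =>
      if word == "I" || word == "A" then (true, memo)
      else
        let r := anyRedLoop (fun c m => is_reducible f c words m) words (generate_children word) memo
        (r.1, r.2.insert word r.1)

-- the list comprehension `[child for child in ... if child in words and is_reducible(...)]`
def filterRedLoop (fn : String → PySem.Dict String Bool → Bool × PySem.Dict String Bool)
    (words : List String) : List String → PySem.Dict String Bool → List String × PySem.Dict String Bool
  | [], m => ([], m)
  | c :: rest, m =>
    if words.contains c then
      let r := fn c m
      let rec' := filterRedLoop fn words rest r.2
      (if r.1 then c :: rec'.1 else rec'.1, rec'.2)
    else filterRedLoop fn words rest m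

-- `max(generator, default=0)` (as the running Optional maximum), threading the memo
def maxLoop (fn : String → PySem.Dict String Bool → Int × PySem.Dict String Bool) :
    List String → PySem.Dict String Bool → Option Int → Option Int × PySem.Dict String Bool
  | [], m, acc => (acc, m)
  | c :: rest, m, acc =>
    let r := fn c m
    maxLoop fn rest r.2 (some (match acc with | none => r.1 | some a => max a r.1))

def count_reductions (fuel : Nat) (word : String) (words : List String)
    (memo : PySem.Dict String Bool) : Int × PySem.Dict String Bool :=
  match fuel with
  | 0 => (0, memo)              -- fuel guard only; never reached with fuel = len(word)+1
  | f + 1 =>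
    if word == "I" || word == "A" then (1, memo)
    else
      let ch := filterRedLoop (fun c m => is_reducible f c words m) words (generate_children word) memo
      let mx := maxLoop (fun c m => count_reductions f c words m) ch.1 ch.2 none
      (1 + mx.1.getD 0, mx.2)

-- the body of A's `for word in choices` loop
def findStepA (words : List String)
    (st : PySem.Dict String Bool × String × Int × PySem.Dict String Int) (word : String) :
    PySem.Dict String Bool × String × Int × PySem.Dict String Int :=
  let (memo, longest, maxlen, counts) := st
  let r := is_reducible (word.toList.length + 1) word words memo
  if r.1 then
    let c := count_reductions (word.toList.length + 1) word words r.2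
    let counts' := counts.insert word c.1
    if PySem.Str.len word > maxlen then (c.2, word, PySem.Str.len word, counts')
    else (c.2, longest, maxlen, counts')
  else (r.2, longest, maxlen, counts)

def find_longest_reducible (choices : List String) (words : List String) :
    String × (List (String × Int)) :=
  let st := choices.foldl (findStepA words) (PySem.Dict.empty, "", 0, PySem.Dict.empty)
  (st.2.1, st.2.2.2.items)

-- ===== PORT B =====
-- _best(depth, w): max depth[c]+1 over children present in depth, else 0
def bestLoop (depth : PySem.Dict String Int) (w : String) : Int :=
  (PySem.List.pyRange 0 (PySem.Str.len w) 1).foldl (fun best i =>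
    match depth.get? (pyDel w i) with
    | some v => max best (v + 1)
    | none => best) 0

-- _build_depth(words): bottom-up over the distinct words sorted by length
def buildDepth (words : List String) : PySem.Dict String Int :=
  (PySem.List.sorted (PySem.Set.ofList words) PySem.Str.len).foldl
    (fun d w =>
      if w == "I" || w == "A" then d.insert w 1
      else
        let best := bestLoop d w
        if best != 0 then d.insert w best else d)
    PySem.Dict.empty

-- the body of B's `for word in choices` loop
def findStepB (depth : PySem.Dict String Int)
    (acc : String × PySem.Dict String Int) (word : String) : String × PySem.Dict String Int :=
  let cnt : Int := if word == "I" || word == "A" then 1 else bestLoop depth word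
  if cnt != 0 then
    (if PySem.Str.len word > PySem.Str.len acc.1 then word else acc.1, acc.2.insert word cnt)
  else acc

def find_longest_reducible_alt (choices : List String) (words : List String) :
    String × (List (String × Int)) :=
  let depth := buildDepth words
  let r := choices.foldl (findStepB depth) ("", PySem.Dict.empty)
  (r.1, r.2.items)

-- ===== PRECONDITION & SPEC =====
def Spec_find_longest_reducible (choices : List String) (words : List String) (out : String × (List (String × Int))) : Prop := out = find_longest_reducible_alt choices words
instance (choices : List String) (words : List String) (out : String × (List (String × Int))) : Decidable (Spec_find_longest_reducible choices words out) := by unfold Spec_find_longest_reducible; infer_instance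

-- ===== CLAIM (what is proved, stated in full; the proofs are below) =====
def Claim_equal_find_longest_reducible : Prop := ∀ (choices : List String) (words : List String), Dom_find_longest_reducible choices words → Spec_find_longest_reducible choices words (find_longest_reducible choices words)

-- ===== LEMMAS AND PROOFS =====

def lenN (w : String) : Nat := w.toList.length

-- pure reference: reducibility with fuel
def redP (fuel : Nat) (ws : List String) (w : String) : Bool :=
  match fuel with
  | 0 => false
  | f + 1 => (w == "I" || w == "A") || (childGen w).any (fun c => ws.contains c && redP f ws c)

def maxF (l : List String) (f : String → Int) : Int := l.foldl (fun a c => max a (f c)) 0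

-- pure reference: reduction count with fuel
def cntP (fuel : Nat) (ws : List String) (w : String) : Int :=
  match fuel with
  | 0 => 0
  | f + 1 =>
    if w == "I" || w == "A" then 1
    else 1 + maxF ((childGen w).filter (fun c => ws.contains c && redP f ws c)) (cntP f ws)

def redC (ws : List String) (w : String) : Bool := redP (lenN w + 1) ws w
def cntC (ws : List String) (w : String) : Int := cntP (lenN w + 1) ws w

lemma any_congr_mem {l : List String} {p q : String → Bool} (h : ∀ x ∈ l, p x = q x) :
    l.any p = l.any q := by
  rw [Bool.eq_iff_iff]
  simp only [List.any_eq_true]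
  constructor
  · rintro ⟨x, hx, hpx⟩; exact ⟨x, hx, (h x hx) ▸ hpx⟩
  · rintro ⟨x, hx, hqx⟩; exact ⟨x, hx, (h x hx).symm ▸ hqx⟩

lemma childGen_len (w : String) : ∀ c ∈ childGen w, lenN c + 1 = lenN w := by
  intro c hc
  simp only [childGen, List.mem_map] at hc
  obtain ⟨i, hi, rfl⟩ := hc
  rw [PySem.Str.len_eq, PySem.List.mem_pyRange_one] at hi
  obtain ⟨h0, h1⟩ := hi
  obtain ⟨k, rfl⟩ := Int.eq_ofNat_of_zero_le h0
  have hk : k < w.toList.length := by exact_mod_cast h1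
  unfold pyDel lenN
  rw [PySem.List.slice_to_natCast]
  rw [show ((k : Int) + 1) = ((k + 1 : Nat) : Int) by push_cast; ring]
  rw [PySem.List.slice_from_natCast]
  simp only [String.toList_ofList, List.length_append, List.length_take, List.length_drop]
  omega

lemma redP_canon (ws : List String) : ∀ f w, lenN w < f → redP f ws w = redC ws w := by
  intro f
  induction f using Nat.strong_induction_on with
  | _ f ih =>
    intro w hw
    match f, hw with
    | f0 + 1, hw =>
      show redP (f0 + 1) ws w = redP (lenN w + 1) ws w
      simp only [redP]
      congr 1
      apply any_congr_mem
      intro c hc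
      have hcl := childGen_len w c hc
      have e1 : redP f0 ws c = redC ws c := ih f0 (by omega) c (by omega)
      have e2 : redP (lenN w) ws c = redC ws c := ih (lenN w) (by omega) c (by omega)
      rw [e1, e2]

lemma cntP_canon (ws : List String) : ∀ f w, lenN w < f → cntP f ws w = cntC ws w := by
  intro f
  induction f using Nat.strong_induction_on with
  | _ f ih =>
    intro w hw
    match f, hw with
    | f0 + 1, hw =>
      show cntP (f0 + 1) ws w = cntP (lenN w + 1) ws w
      simp only [cntP]
      have hfilt : ∀ g : Nat, lenN w ≤ g →
          (childGen w).filter (fun c => ws.contains c && redP g ws c)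
            = (childGen w).filter (fun c => ws.contains c && redC ws c) := by
        intro g hg
        apply List.filter_congr
        intro c hc
        have hcl := childGen_len w c hc
        rw [redP_canon ws g c (by omega)]
      rw [hfilt f0 (by omega), hfilt (lenN w) (by omega)]
      congr 1
      congr 1
      unfold maxF
      apply PySem.List.foldl_congr_mem
      intro acc c hc
      have hcm : c ∈ childGen w := List.mem_of_mem_filter hc
      have hcl := childGen_len w c hcm
      rw [ih f0 (by omega) c (by omega), ih (lenN w) (by omega) c (by omega)]

lemma redC_unfold (ws : List String) (w : String) :
    redC ws w = ((w == "I" || w == "A") || (childGen w).any (fun c => ws.contains c && redC ws c)) := by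
  show redP (lenN w + 1) ws w = _
  simp only [redP]
  congr 1
  apply any_congr_mem
  intro c hc
  have hcl := childGen_len w c hc
  rw [redP_canon ws (lenN w) c (by omega)]

lemma cntC_unfold (ws : List String) (w : String) :
    cntC ws w = (if w == "I" || w == "A" then 1
      else 1 + maxF ((childGen w).filter (fun c => ws.contains c && redC ws c)) (cntC ws)) := by
  show cntP (lenN w + 1) ws w = _
  simp only [cntP]
  have hfilt : (childGen w).filter (fun c => ws.contains c && redP (lenN w) ws c)
      = (childGen w).filter (fun c => ws.contains c && redC ws c) := by
    apply List.filter_congr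
    intro c hc
    have hcl := childGen_len w c hc
    rw [redP_canon ws (lenN w) c (by omega)]
  rw [hfilt]
  congr 1
  congr 1
  unfold maxF
  apply PySem.List.foldl_congr_mem
  intro acc c hc
  have hcl := childGen_len w c (List.mem_of_mem_filter hc)
  rw [cntP_canon ws (lenN w) c (by omega)]

lemma le_foldlMax (f : String → Int) : ∀ (l : List String) (a : Int),
    a ≤ l.foldl (fun x c => max x (f c)) a := by
  intro l
  induction l with
  | nil => intro a; simp
  | cons c rest ih =>
    intro a
    simp only [List.foldl_cons]
    exact le_trans (le_max_left a (f c)) (ih _)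

lemma foldlMax_mem_le (f : String → Int) : ∀ (l : List String) (a : Int), ∀ c ∈ l,
    f c ≤ l.foldl (fun x c => max x (f c)) a := by
  intro l
  induction l with
  | nil => intro a c hc; simp at hc
  | cons x rest ih =>
    intro a c hc
    simp only [List.foldl_cons]
    rcases List.mem_cons.mp hc with h | h
    · subst h; exact le_trans (le_max_right a (f c)) (le_foldlMax f rest _)
    · exact ih _ c h

lemma foldlMax_cases (f : String → Int) : ∀ (l : List String) (a : Int),
    l.foldl (fun x c => max x (f c)) a = a ∨ ∃ c ∈ l, l.foldl (fun x c => max x (f c)) a = f c := by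
  intro l
  induction l with
  | nil => intro a; left; rfl
  | cons x rest ih =>
    intro a
    simp only [List.foldl_cons]
    rcases ih (max a (f x)) with h | ⟨c, hc, h⟩
    · rcases max_cases a (f x) with ⟨hm, _⟩ | ⟨hm, _⟩
      · left; rw [h, hm]
      · right; exact ⟨x, List.mem_cons_self .., by rw [h, hm]⟩
    · right; exact ⟨c, List.mem_cons_of_mem _ hc, h⟩

lemma foldlMax_memEq (f : String → Int) (l1 l2 : List String) (h : ∀ x, x ∈ l1 ↔ x ∈ l2) (a : Int) :
    l1.foldl (fun x c => max x (f c)) a = l2.foldl (fun x c => max x (f c)) a := by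
  apply le_antisymm
  · rcases foldlMax_cases f l1 a with he | ⟨c, hc, he⟩
    · rw [he]; exact le_foldlMax f l2 a
    · rw [he]; exact foldlMax_mem_le f l2 a c ((h c).mp hc)
  · rcases foldlMax_cases f l2 a with he | ⟨c, hc, he⟩
    · rw [he]; exact le_foldlMax f l1 a
    · rw [he]; exact foldlMax_mem_le f l1 a c ((h c).mpr hc)

lemma cntP_nonneg (ws : List String) : ∀ f w, 0 ≤ cntP f ws w := by
  intro f w
  match f with
  | 0 => simp [cntP]
  | f0 + 1 =>
    simp only [cntP]
    split
    · omega
    · have := le_foldlMax (cntP f0 ws) ((childGen w).filter (fun c => ws.contains c && redP f0 ws c)) 0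
      unfold maxF
      omega

lemma cntC_nonneg (ws : List String) (w : String) : 0 ≤ cntC ws w := cntP_nonneg ws _ w

lemma cntC_pos (ws : List String) (w : String) : 1 ≤ cntC ws w := by
  rw [cntC_unfold]
  split
  · omega
  · have := le_foldlMax (cntC ws) ((childGen w).filter (fun c => ws.contains c && redC ws c)) 0
    unfold maxF
    omega

-- optMax: the pure value of maxLoop
lemma optFold_some (f : String → Int) : ∀ (l : List String) (x : Int),
    l.foldl (fun a c => some (match a with | none => f c | some v => max v (f c))) (some x)
      = some (l.foldl (fun a c => max a (f c)) x) := by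
  intro l
  induction l with
  | nil => intro x; rfl
  | cons c rest ih => intro x; simpa using ih (max x (f c))

lemma optFold_getD (f : String → Int) (l : List String) (h : ∀ c ∈ l, 0 ≤ f c) :
    (l.foldl (fun a c => some (match a with | none => f c | some v => max v (f c))) none).getD 0
      = l.foldl (fun a c => max a (f c)) 0 := by
  match l with
  | [] => rfl
  | c :: rest =>
    simp only [List.foldl_cons]
    rw [show (some (f c)) = (some (max 0 (f c))) by
      rw [max_eq_right (h c (List.mem_cons_self ..))]]
    rw [optFold_some]
    rfl

lemma foldl_if_filter (p : String → Bool) (g : String → Int) : ∀ (l : List String) (a : Int),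
    l.foldl (fun b c => if p c then max b (g c) else b) a
      = (l.filter p).foldl (fun b c => max b (g c)) a := by
  intro l
  induction l with
  | nil => intro a; rfl
  | cons c rest ih =>
    intro a
    by_cases hp : p c = true
    · simp [hp, ih]
    · simp only [Bool.not_eq_true] at hp
      simp [hp, ih]

lemma foldlMax_succ (f : String → Int) : ∀ (l : List String) (a : Int),
    l.foldl (fun b c => max b (f c + 1)) (a + 1) = l.foldl (fun b c => max b (f c)) a + 1 := by
  intro l
  induction l with
  | nil => intro a; rfl
  | cons c rest ih =>
    intro a
    simp only [List.foldl_cons]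
    rw [show max (a + 1) (f c + 1) = max a (f c) + 1 from (max_add_add_right a (f c) 1)]
    exact ih (max a (f c))

lemma foldlMax_plus_one (f : String → Int) (l : List String) (hne : l ≠ [])
    (h : ∀ c ∈ l, 0 ≤ f c) :
    l.foldl (fun b c => max b (f c + 1)) 0 = 1 + l.foldl (fun b c => max b (f c)) 0 := by
  match l with
  | c :: rest =>
    simp only [List.foldl_cons]
    have h0 : (0:Int) ≤ f c := h c (List.mem_cons_self ..)
    rw [max_eq_right (by omega : (0:Int) ≤ f c + 1), max_eq_right h0]
    rw [show f c + 1 = f c + 1 from rfl]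
    have := foldlMax_succ f rest (f c)
    omega

lemma any_ofList (l : List String) (p : String → Bool) :
    (PySem.Set.ofList l).any p = l.any p := by
  rw [Bool.eq_iff_iff]
  simp only [List.any_eq_true]
  constructor
  · rintro ⟨x, hx, hpx⟩; exact ⟨x, (PySem.Set.mem_ofList l x).mp hx, hpx⟩
  · rintro ⟨x, hx, hpx⟩; exact ⟨x, (PySem.Set.mem_ofList l x).mpr hx, hpx⟩

-- A's memo is consistent with pure reducibility
def Good (ws : List String) (m : PySem.Dict String Bool) : Prop :=
  ∀ k b, m.get? k = some b → b = redC ws k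

lemma good_empty (ws : List String) : Good ws PySem.Dict.empty := by
  intro k b h
  rw [PySem.Dict.get?_empty] at h
  exact absurd h (by simp)

lemma good_insert (ws : List String) (m : PySem.Dict String Bool) (w : String)
    (hm : Good ws m) (b : Bool) (hb : b = redC ws w) :
    Good ws (m.insert w b) := by
  intro k v h
  by_cases hk : k = w
  · subst hk
    rw [PySem.Dict.get?_insert_self] at h
    cases h
    exact hb
  · rw [PySem.Dict.get?_insert_of_ne m b hk] at h
    exact hm k v h

lemma anyRedLoop_spec (ws : List String)
    (fn : String → PySem.Dict String Bool → Bool × PySem.Dict String Bool)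
    (l : List String)
    (hfn : ∀ c ∈ l, ∀ m, Good ws m → (fn c m).1 = redC ws c ∧ Good ws (fn c m).2) :
    ∀ m, Good ws m →
      (anyRedLoop fn ws l m).1 = l.any (fun c => ws.contains c && redC ws c)
        ∧ Good ws (anyRedLoop fn ws l m).2 := by
  induction l with
  | nil => intro m hm; exact ⟨rfl, hm⟩
  | cons c rest ih =>
    intro m hm
    have hc := hfn c (List.mem_cons_self ..) m hm
    have hrest : ∀ x ∈ rest, ∀ m, Good ws m → (fn x m).1 = redC ws x ∧ Good ws (fn x m).2 :=
      fun x hx => hfn x (List.mem_cons_of_mem _ hx)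
    simp only [anyRedLoop, List.any_cons]
    by_cases hcw : ws.contains c = true
    · simp only [hcw, if_true, Bool.true_and]
      by_cases hr : (fn c m).1 = true
      · simp only [hr, if_true]
        rw [hc.1] at hr
        exact ⟨by simp [hr], hc.2⟩
      · simp only [hr]
        rw [hc.1] at hr
        simp only [Bool.not_eq_true] at hr
        simp only [hr]
        have := ih hrest (fn c m).2 hc.2
        simpa using this
    · simp only [Bool.not_eq_true] at hcw
      simp only [hcw]
      have := ih hrest m hm
      simpa using this

lemma isRed_spec (ws : List String) : ∀ (f : Nat) (w : String) (m : PySem.Dict String Bool),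
    lenN w < f → Good ws m →
    (is_reducible f w ws m).1 = redC ws w ∧ Good ws (is_reducible f w ws m).2 := by
  intro f
  induction f using Nat.strong_induction_on with
  | _ f ih =>
    intro w m hw hm
    match f, hw with
    | f0 + 1, hw =>
      simp only [is_reducible]
      cases hget : m.get? w with
      | some b =>
        simp only
        exact ⟨hm w b hget, hm⟩
      | none =>
        simp only
        by_cases hb : (w == "I" || w == "A") = true
        · simp only [hb, if_true]
          refine ⟨?_, hm⟩
          rw [redC_unfold, hb, Bool.true_or]
        · simp only [Bool.not_eq_true] at hb
          simp only [hb]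
          have hfn : ∀ c ∈ generate_children w, ∀ m, Good ws m →
              ((fun c m => is_reducible f0 c ws m) c m).1 = redC ws c
                ∧ Good ws (((fun c m => is_reducible f0 c ws m)) c m).2 := by
            intro c hc m' hm'
            have hcg : c ∈ childGen w := (PySem.Set.mem_ofList _ _).mp hc
            have hcl := childGen_len w c hcg
            exact ih f0 (by omega) c m' (by omega) hm'
          have hsp := anyRedLoop_spec ws _ (generate_children w) hfn m hm
          refine ⟨?_, ?_⟩
          · show (anyRedLoop _ ws (generate_children w) m).1 = redC ws w
            rw [hsp.1, redC_unfold, hb, Bool.false_or]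
            show (PySem.Set.ofList (childGen w)).any _ = _
            rw [any_ofList]
          · show Good ws ((anyRedLoop _ ws (generate_children w) m).2.insert w
              (anyRedLoop _ ws (generate_children w) m).1)
            apply good_insert ws _ w hsp.2
            rw [hsp.1, redC_unfold, hb, Bool.false_or]
            show (PySem.Set.ofList (childGen w)).any _ = _
            rw [any_ofList]

lemma filterRedLoop_spec (ws : List String)
    (fn : String → PySem.Dict String Bool → Bool × PySem.Dict String Bool)
    (l : List String)
    (hfn : ∀ c ∈ l, ∀ m, Good ws m → (fn c m).1 = redC ws c ∧ Good ws (fn c m).2) :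
    ∀ m, Good ws m →
      (filterRedLoop fn ws l m).1 = l.filter (fun c => ws.contains c && redC ws c)
        ∧ Good ws (filterRedLoop fn ws l m).2 := by
  induction l with
  | nil => intro m hm; exact ⟨rfl, hm⟩
  | cons c rest ih =>
    intro m hm
    have hc := hfn c (List.mem_cons_self ..) m hm
    have hrest : ∀ x ∈ rest, ∀ m, Good ws m → (fn x m).1 = redC ws x ∧ Good ws (fn x m).2 :=
      fun x hx => hfn x (List.mem_cons_of_mem _ hx)
    simp only [filterRedLoop, List.filter_cons]
    by_cases hcw : ws.contains c = true
    · simp only [hcw, if_true, Bool.true_and]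
      have hr := ih hrest (fn c m).2 hc.2
      refine ⟨?_, hr.2⟩
      rw [hc.1, hr.1]
    · simp only [Bool.not_eq_true] at hcw
      simp only [hcw]
      have hr := ih hrest m hm
      exact ⟨by simpa using hr.1, hr.2⟩

lemma maxLoop_spec (ws : List String)
    (fn : String → PySem.Dict String Bool → Int × PySem.Dict String Bool)
    (l : List String)
    (hfn : ∀ c ∈ l, ∀ m, Good ws m → (fn c m).1 = cntC ws c ∧ Good ws (fn c m).2) :
    ∀ (m : PySem.Dict String Bool) (acc : Option Int), Good ws m →
      (maxLoop fn l m acc).1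
          = l.foldl (fun a c => some (match a with | none => cntC ws c | some v => max v (cntC ws c))) acc
        ∧ Good ws (maxLoop fn l m acc).2 := by
  induction l with
  | nil => intro m acc hm; exact ⟨rfl, hm⟩
  | cons c rest ih =>
    intro m acc hm
    have hc := hfn c (List.mem_cons_self ..) m hm
    have hrest : ∀ x ∈ rest, ∀ m, Good ws m → (fn x m).1 = cntC ws x ∧ Good ws (fn x m).2 :=
      fun x hx => hfn x (List.mem_cons_of_mem _ hx)
    simp only [maxLoop, List.foldl_cons]
    rw [hc.1]
    exact ih hrest (fn c m).2 _ hc.2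

lemma cnt_spec (ws : List String) : ∀ (f : Nat) (w : String) (m : PySem.Dict String Bool),
    lenN w < f → Good ws m →
    (count_reductions f w ws m).1 = cntC ws w ∧ Good ws (count_reductions f w ws m).2 := by
  intro f
  induction f using Nat.strong_induction_on with
  | _ f ih =>
    intro w m hw hm
    match f, hw with
    | f0 + 1, hw =>
      simp only [count_reductions]
      by_cases hb : (w == "I" || w == "A") = true
      · simp only [hb, if_true]
        refine ⟨?_, hm⟩
        rw [cntC_unfold, hb]
        simp
      · simp only [Bool.not_eq_true] at hb
        simp only [hb]
        have hfn : ∀ c ∈ generate_children w, ∀ m, Good ws m →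
            ((fun c m => is_reducible f0 c ws m) c m).1 = redC ws c
              ∧ Good ws (((fun c m => is_reducible f0 c ws m)) c m).2 := by
          intro c hc m' hm'
          have hcg : c ∈ childGen w := (PySem.Set.mem_ofList _ _).mp hc
          have hcl := childGen_len w c hcg
          exact isRed_spec ws f0 c m' (by omega) hm'
        have hflt := filterRedLoop_spec ws _ (generate_children w) hfn m hm
        set ch := filterRedLoop (fun c m => is_reducible f0 c ws m) ws (generate_children w) m with hch
        have hsub : ∀ c ∈ ch.1, lenN c + 1 = lenN w := by
          intro c hc
          rw [hflt.1] at hc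
          have := List.mem_of_mem_filter hc
          exact childGen_len w c ((PySem.Set.mem_ofList _ _).mp this)
        have hfn2 : ∀ c ∈ ch.1, ∀ m, Good ws m →
            ((fun c m => count_reductions f0 c ws m) c m).1 = cntC ws c
              ∧ Good ws (((fun c m => count_reductions f0 c ws m)) c m).2 := by
          intro c hc m' hm'
          have hcl := hsub c hc
          exact ih f0 (by omega) c m' (by omega) hm'
        have hmx := maxLoop_spec ws _ ch.1 hfn2 ch.2 none hflt.2
        refine ⟨?_, hmx.2⟩
        rw [hmx.1]
        rw [optFold_getD (cntC ws) ch.1 (fun c _ => cntC_nonneg ws c)]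
        rw [cntC_unfold ws w, hb]
        simp only [Bool.false_eq_true, if_false]
        congr 1
        rw [hflt.1]
        show _ = maxF _ (cntC ws)
        unfold maxF
        apply foldlMax_memEq
        intro x
        constructor
        · intro hx
          have h1 := List.mem_of_mem_filter hx
          have h2 := List.of_mem_filter hx
          exact List.mem_filter.mpr ⟨(PySem.Set.mem_ofList _ _).mp h1, h2⟩
        · intro hx
          have h1 := List.mem_of_mem_filter hx
          have h2 := List.of_mem_filter hx
          exact List.mem_filter.mpr ⟨(PySem.Set.mem_ofList _ _).mpr h1, h2⟩

lemma bestLoop_val (ws : List String) (d : PySem.Dict String Int) (w : String)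
    (hb : (w == "I" || w == "A") = false)
    (hd : ∀ c ∈ childGen w,
      d.get? c = if (ws.contains c && redC ws c) = true then some (cntC ws c) else none) :
    bestLoop d w = if redC ws w = true then cntC ws w else 0 := by
  have h1 : bestLoop d w = (childGen w).foldl
      (fun best c => match d.get? c with | some v => max best (v + 1) | none => best) 0 := by
    unfold bestLoop childGen
    rw [List.foldl_map]
  rw [h1]
  rw [PySem.List.foldl_congr_mem (childGen w) _
    (fun best c => if (ws.contains c && redC ws c) = true then max best (cntC ws c + 1) else best) 0
    (by
      intro acc c hc
      rw [hd c hc]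
      by_cases hp : (ws.contains c && redC ws c) = true
      · simp only [hp]; rfl
      · simp only [Bool.not_eq_true] at hp
        simp only [hp]; rfl)]
  rw [foldl_if_filter]
  have hany : redC ws w = (childGen w).any (fun c => ws.contains c && redC ws c) := by
    rw [redC_unfold ws w, hb, Bool.false_or]
  by_cases hred : redC ws w = true
  · simp only [hred, if_true]
    obtain ⟨c, hc, hpc⟩ := List.any_eq_true.mp (hany ▸ hred)
    have hne : (childGen w).filter (fun c => ws.contains c && redC ws c) ≠ [] :=
      List.ne_nil_of_mem (List.mem_filter.mpr ⟨hc, hpc⟩)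
    rw [foldlMax_plus_one (cntC ws) _ hne (fun c _ => cntC_nonneg ws c)]
    rw [cntC_unfold ws w, hb]
    simp only [Bool.false_eq_true, if_false]
    rfl
  · simp only [Bool.not_eq_true] at hred
    simp only [hred, Bool.false_eq_true, if_false]
    have : (childGen w).filter (fun c => ws.contains c && redC ws c) = [] := by
      apply List.filter_eq_nil_iff.mpr
      intro a ha hpa
      have : (childGen w).any (fun c => ws.contains c && redC ws c) = true :=
        List.any_eq_true.mpr ⟨a, ha, hpa⟩
      rw [← hany, hred] at this
      exact absurd this (by simp)
    rw [this]
    rfl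

lemma buildAux (ws : List String) : ∀ (R P : List String) (d : PySem.Dict String Int),
    P ++ R = PySem.List.sorted (PySem.Set.ofList ws) PySem.Str.len →
    (∀ k, d.get? k = if k ∈ P ∧ redC ws k = true then some (cntC ws k) else none) →
    ∀ k, (R.foldl (fun d w =>
        if w == "I" || w == "A" then d.insert w 1
        else
          let best := bestLoop d w
          if best != 0 then d.insert w best else d) d).get? k
      = if (k ∈ P ∨ k ∈ R) ∧ redC ws k = true then some (cntC ws k) else none := by
  intro R
  induction R with
  | nil =>
    intro P d _ hinv k
    simpa using hinv k
  | cons w R' ih =>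
    intro P d hS hinv k
    simp only [List.foldl_cons]
    have hSperm := PySem.List.sorted_perm (PySem.Set.ofList ws) PySem.Str.len false
    have hnd : (P ++ w :: R').Nodup := by
      rw [hS]; exact hSperm.symm.nodup (PySem.Set.nodup_ofList ws)
    have hpw : (P ++ w :: R').Pairwise (fun a b => PySem.Str.len a ≤ PySem.Str.len b) := by
      rw [hS]; exact PySem.List.sorted_pairwise _ _
    have hwP : w ∉ P := fun hw =>
      (List.nodup_append.mp hnd).2.2 w hw w (List.mem_cons_self ..) rfl
    have hlenR : ∀ c ∈ R', PySem.Str.len w ≤ PySem.Str.len c :=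
      (List.pairwise_cons.mp (List.pairwise_append.mp hpw).2.1).1
    have hwS : w ∈ PySem.Set.ofList ws := by
      have hmem : w ∈ P ++ w :: R' := by simp
      rw [hS] at hmem
      exact hSperm.mem_iff.mp hmem
    have hchildP : ∀ c ∈ childGen w, (ws.contains c = true ↔ c ∈ P) := by
      intro c hc
      have hclen := childGen_len w c hc
      constructor
      · intro hcw
        have hcm : c ∈ PySem.Set.ofList ws := (PySem.Set.mem_ofList ws c).mpr (by simpa using hcw)
        have hcm2 : c ∈ P ++ w :: R' := by rw [hS]; exact hSperm.mem_iff.mpr hcm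
        rcases List.mem_append.mp hcm2 with h | h
        · exact h
        · exfalso
          rcases List.mem_cons.mp h with h | h
          · subst h; omega
          · have hle := hlenR c h
            rw [PySem.Str.len_eq, PySem.Str.len_eq] at hle
            have : w.toList.length ≤ c.toList.length := by exact_mod_cast hle
            unfold lenN at hclen
            omega
      · intro hcP
        have hcm2 : c ∈ P ++ w :: R' := List.mem_append.mpr (Or.inl hcP)
        rw [hS] at hcm2
        have := (PySem.Set.mem_ofList ws c).mp (hSperm.mem_iff.mp hcm2)
        simpa using this
    have hd : ∀ c ∈ childGen w,
        d.get? c = if (ws.contains c && redC ws c) = true then some (cntC ws c) else none := by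
      intro c hc
      rw [hinv c]
      by_cases h1 : ws.contains c = true
      · have h2 : c ∈ P := (hchildP c hc).mp h1
        by_cases h3 : redC ws c = true
        · rw [if_pos ⟨h2, h3⟩,
            if_pos (show (ws.contains c && redC ws c) = true by rw [h1, h3]; rfl)]
        · simp only [Bool.not_eq_true] at h3
          rw [if_neg (fun h => by rw [h3] at h; exact absurd h.2 (by simp)),
            if_neg (by rw [h3]; simp)]
      · have h2 : c ∉ P := fun hp => h1 ((hchildP c hc).mpr hp)
        simp only [Bool.not_eq_true] at h1
        rw [if_neg (fun h => h2 h.1), if_neg (by rw [h1]; simp)]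
    have hfin : ∀ (d' : PySem.Dict String Int),
        (∀ k, d'.get? k = if k ∈ P ++ [w] ∧ redC ws k = true then some (cntC ws k) else none) →
        (R'.foldl (fun d w =>
          if w == "I" || w == "A" then d.insert w 1
          else
            let best := bestLoop d w
            if best != 0 then d.insert w best else d) d').get? k
          = if (k ∈ P ∨ k ∈ w :: R') ∧ redC ws k = true then some (cntC ws k) else none := by
      intro d' hnew
      have := ih (P ++ [w]) d' (by rw [← hS]; simp) hnew k
      rw [this]
      apply if_congr _ rfl rfl
      simp only [List.mem_append, List.mem_cons]
      tauto
    have hinsert : ∀ (v : Int), redC ws w = true → v = cntC ws w →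
        (∀ k, (d.insert w v).get? k
          = if k ∈ P ++ [w] ∧ redC ws k = true then some (cntC ws k) else none) := by
      intro v hredw hv k'
      by_cases hk : k' = w
      · subst hk
        rw [PySem.Dict.get?_insert_self, hv]
        simp [hredw]
      · rw [PySem.Dict.get?_insert_of_ne d v hk, hinv k']
        have hiff : k' ∈ P ++ [w] ↔ k' ∈ P := by simp [hk]
        simp only [hiff]
    by_cases hbase : (w == "I" || w == "A") = true
    · simp only [hbase, if_true]
      have hredw : redC ws w = true := by rw [redC_unfold ws w, hbase]; simp
      have hcntw : cntC ws w = 1 := by rw [cntC_unfold ws w, hbase]; simp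
      exact hfin (d.insert w 1) (hinsert 1 hredw hcntw.symm)
    · simp only [Bool.not_eq_true] at hbase
      simp only [hbase, Bool.false_eq_true, if_false]
      have hbv := bestLoop_val ws d w hbase hd
      by_cases hredw : redC ws w = true
      · rw [hredw] at hbv
        simp only [reduceIte] at hbv
        have hpos := cntC_pos ws w
        have hbne : (bestLoop d w != 0) = true := bne_iff_ne.mpr (by omega)
        simp only [hbne, reduceIte]
        exact hfin (d.insert w (bestLoop d w)) (hinsert (bestLoop d w) hredw hbv)
      · simp only [Bool.not_eq_true] at hredw
        rw [hredw] at hbv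
        simp only [Bool.false_eq_true, reduceIte] at hbv
        have hbne : (bestLoop d w != 0) = false := by rw [hbv]; simp
        simp only [hbne, Bool.false_eq_true, reduceIte]
        apply hfin d
        intro k'
        rw [hinv k']
        apply if_congr _ rfl rfl
        simp only [List.mem_append, List.mem_singleton]
        constructor
        · rintro ⟨h1, h2⟩; exact ⟨Or.inl h1, h2⟩
        · rintro ⟨h1, h2⟩
          rcases h1 with h1 | h1
          · exact ⟨h1, h2⟩
          · subst h1; rw [hredw] at h2; exact absurd h2 (by simp)

-- B side: the depth table is exactly {w ∈ set(words) reducible ↦ its count}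
lemma buildDepth_get (ws : List String) (k : String) :
    (buildDepth ws).get? k
      = if k ∈ PySem.Set.ofList ws ∧ redC ws k = true then some (cntC ws k) else none := by
  unfold buildDepth
  have := buildAux ws (PySem.List.sorted (PySem.Set.ofList ws) PySem.Str.len) [] PySem.Dict.empty
    (by simp)
    (by intro k'; rw [PySem.Dict.get?_empty]; simp)
    k
  rw [this]
  apply if_congr _ rfl rfl
  have := (PySem.List.sorted_perm (PySem.Set.ofList ws) PySem.Str.len false).mem_iff (a := k)
  simp only [List.not_mem_nil, false_or]
  rw [this]

lemma bestLoop_eq (ws : List String) (w : String) (hw : (w == "I" || w == "A") = false) :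
    bestLoop (buildDepth ws) w = (if redC ws w then cntC ws w else 0) := by
  apply bestLoop_val ws (buildDepth ws) w hw
  intro c _
  rw [buildDepth_get ws c]
  apply if_congr _ rfl rfl
  rw [PySem.Set.mem_ofList]
  constructor
  · rintro ⟨h1, h2⟩
    rw [(show ws.contains c = true by simpa using h1), h2]
    rfl
  · intro h
    simp only [Bool.and_eq_true] at h
    exact ⟨by simpa using h.1, h.2⟩

lemma mainLoop (ws : List String) : ∀ (cs : List String)
    (memo : PySem.Dict String Bool) (long : String) (counts : PySem.Dict String Int),
    Good ws memo →
    (cs.foldl (findStepA ws) (memo, long, PySem.Str.len long, counts)).2.1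
        = (cs.foldl (findStepB (buildDepth ws)) (long, counts)).1
      ∧ (cs.foldl (findStepA ws) (memo, long, PySem.Str.len long, counts)).2.2.2
        = (cs.foldl (findStepB (buildDepth ws)) (long, counts)).2 := by
  intro cs
  induction cs with
  | nil => intro memo long counts _; exact ⟨rfl, rfl⟩
  | cons word cs' ih =>
    intro memo long counts hm
    simp only [List.foldl_cons, findStepA, findStepB]
    have hlt : lenN word < word.toList.length + 1 := Nat.lt_succ_of_le (le_refl _)
    have hr := isRed_spec ws (word.toList.length + 1) word memo hlt hm
    rw [hr.1]
    by_cases hred : redC ws word = true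
    · have hc := cnt_spec ws (word.toList.length + 1) word _ hlt hr.2
      rw [hred, hc.1]
      simp only [reduceIte]
      have hcnt : (if (word == "I" || word == "A") = true then (1:Int)
          else bestLoop (buildDepth ws) word) = cntC ws word := by
        by_cases hb : (word == "I" || word == "A") = true
        · rw [if_pos hb, cntC_unfold ws word, hb]
          simp
        · simp only [Bool.not_eq_true] at hb
          rw [if_neg (by rw [hb]; simp), bestLoop_eq ws word hb, hred]
          simp
      rw [hcnt]
      have hpos := cntC_pos ws word
      have hbne : (cntC ws word != 0) = true := bne_iff_ne.mpr (by omega)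
      rw [hbne]
      simp only [reduceIte]
      by_cases hgt : PySem.Str.len word > PySem.Str.len long
      · rw [if_pos hgt, if_pos hgt]
        exact ih (count_reductions (word.toList.length + 1) word ws
          (is_reducible (word.toList.length + 1) word ws memo).2).2 word
          (counts.insert word (cntC ws word)) hc.2
      · rw [if_neg hgt, if_neg hgt]
        exact ih (count_reductions (word.toList.length + 1) word ws
          (is_reducible (word.toList.length + 1) word ws memo).2).2 long
          (counts.insert word (cntC ws word)) hc.2
    · simp only [Bool.not_eq_true] at hred
      rw [hred]
      simp only [Bool.false_eq_true, reduceIte]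
      have hb : (word == "I" || word == "A") = false := by
        by_contra hbb
        simp only [Bool.not_eq_false] at hbb
        rw [redC_unfold ws word, hbb, Bool.true_or] at hred
        exact absurd hred (by simp)
      have hcnt : (if (word == "I" || word == "A") = true then (1:Int)
          else bestLoop (buildDepth ws) word) = 0 := by
        rw [if_neg (show ¬((word == "I" || word == "A") = true) by rw [hb]; simp)]
        rw [bestLoop_eq ws word hb, hred]
        simp
      rw [hcnt]
      have hbne : ((0:Int) != 0) = false := by simp
      rw [hbne]
      simp only [Bool.false_eq_true, reduceIte]
      exact ih (is_reducible (word.toList.length + 1) word ws memo).2 long counts hr.2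

-- ===== VERDICT (by name: the statement is the Claim_ definition above) =====
theorem find_longest_reducible_spec : Claim_equal_find_longest_reducible := by
  intro choices words _
  unfold Spec_find_longest_reducible
  unfold find_longest_reducible find_longest_reducible_alt
  have h := mainLoop words choices PySem.Dict.empty "" PySem.Dict.empty (good_empty words)
  simp only [show PySem.Str.len "" = 0 by decide] at h
  exact Prod.ext h.1 (congrArg PySem.Dict.items h.2)
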